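-- pv_equiv track=rewrite | github.com/equinor/subscript | src/subscript/ofmvol2csv/ofmvol2csv.py | cleanse_ofm_lines
-- ===== SOURCE A (Python) =====
-- from typing import List, Union
--
-- def cleanse_ofm_lines(filelines: List[str]) -> List[str]:
--     """Cleanup a list of lines::
--
--       * Remove comment lines
--       * Remove empty lines
--       * Make everything upper case
--       * Replace tabs with spaces
--
--     Args:
--         filelines (list): One string pr. line.
--
--     Return:
--         list: One string pr. line
--     """
--     filelines = list(
--         map(str.rstrip, filelines)
--     )  # Remove Windows line endings and any whitespace at line end
--
--     # Remove comment lines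
--     filelines = [line for line in filelines if not line.startswith("--")]
--     # Remove empty lines:
--     filelines = [line for line in filelines if line != ""]
--     # Make everything upper case (not pretty, but simplifies parsing)
--     filelines = [line.upper() for line in filelines]
--     # OFM sometimes uses the tab character, replace by space to robustify parsing
--     return [line.replace("\t", " ") for line in filelines]
-- ===== SOURCE B (Python) =====
-- def cleanse_ofm_lines(filelines):
--     """Character-level cleanup: a backward index scan finds the trailing-whitespace
--     boundary, direct index tests drop comment/empty lines, and one fused
--     per-character pass upper-cases and turns tabs into spaces."""
--     result = []
--     for line in filelines:
--         i = len(line)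
--         while i > 0 and line[i - 1].isspace():
--             i -= 1
--         if i == 0 or (i >= 2 and line[0] == "-" and line[1] == "-"):
--             continue
--         out = []
--         for c in line[:i]:
--             if c == "\t":
--                 out.append(" ")
--             elif "a" <= c <= "z":
--                 out.append(chr(ord(c) - 32))
--             else:
--                 out.append(c)
--         result.append("".join(out))
--     return result
-- ===== Notes on version B (the rewrite author's own statement) =====
-- stated objective: alternative
-- what changed: Replaces the five-stage string-method pipeline (rstrip/startswith filter/empty filter/upper/replace) with character-level index arithmetic: a backward scan computes the trailing-whitespace boundary, two direct index comparisons detect comment lines, and a single fused per-character pass does both upper-casing and tab-to-space replacement.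
import Mathlib
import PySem

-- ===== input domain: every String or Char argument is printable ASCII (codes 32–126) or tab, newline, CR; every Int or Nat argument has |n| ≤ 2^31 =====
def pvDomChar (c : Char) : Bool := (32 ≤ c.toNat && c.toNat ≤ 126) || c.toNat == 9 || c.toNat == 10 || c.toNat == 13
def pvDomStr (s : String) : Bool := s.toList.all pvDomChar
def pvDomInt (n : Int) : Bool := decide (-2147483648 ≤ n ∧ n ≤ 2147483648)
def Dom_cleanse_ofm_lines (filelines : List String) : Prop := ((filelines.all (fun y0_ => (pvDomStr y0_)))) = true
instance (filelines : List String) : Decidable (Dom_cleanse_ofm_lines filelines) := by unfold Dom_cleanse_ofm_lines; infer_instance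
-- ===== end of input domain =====

-- B replaces A's five string-method passes with character-level index arithmetic (backward trim scan, index comment test, one fused per-char upper/tab pass); objective: alternative.


-- ===== PORT A =====
-- five chained passes, exactly as A
def cleanse_ofm_lines (filelines : List String) : List String :=
  let l1 := filelines.map PySem.Str.rstrip
  let l2 := l1.filter (fun line => !(PySem.Str.startswith line "--"))
  let l3 := l2.filter (fun line => line != "")
  let l4 := l3.map PySem.Str.upper
  l4.map (fun line => PySem.Str.replace line "\t" " ")

-- ===== PORT B =====
-- the inner 'while i > 0 and line[i-1].isspace(): i -= 1' of Source B, as recursion on the reversed char list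
def pvTrimLen : List Char → Nat
  | [] => 0
  | c :: t => if PySem.Chars.isspace c then pvTrimLen t else (c :: t).length

-- Source B's per-char if/elif/else: tab -> space, a..z -> chr(ord(c)-32), else unchanged
def pvCleanChar (c : Char) : Char :=
  if c == '\t' then ' '
  else if 'a' ≤ c && c ≤ 'z' then Char.ofNat (c.toNat - 32)
  else c

def cleanse_ofm_lines_alt (filelines : List String) : List String :=
  filelines.foldl (fun result line =>
    let cs := line.toList
    let i := pvTrimLen cs.reverse
    if i == 0 || (decide (2 ≤ i) && (cs[0]? == some '-') && (cs[1]? == some '-')) then result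
    else result ++ [String.ofList ((cs.take i).map pvCleanChar)]) []

-- ===== PRECONDITION & SPEC =====
def Spec_cleanse_ofm_lines (filelines : List String) (out : List String) : Prop := out = cleanse_ofm_lines_alt filelines
instance (filelines : List String) (out : List String) : Decidable (Spec_cleanse_ofm_lines filelines out) := by unfold Spec_cleanse_ofm_lines; infer_instance

-- ===== CLAIM (what is proved, stated in full; the proofs are below) =====
def Claim_equal_cleanse_ofm_lines : Prop := ∀ (filelines : List String), Dom_cleanse_ofm_lines filelines → Spec_cleanse_ofm_lines filelines (cleanse_ofm_lines filelines)

-- ===== LEMMAS AND PROOFS =====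

-- pvTrimLen of a reversed list is the length left after dropping trailing whitespace
theorem pvTrimLen_eq (l : List Char) :
    pvTrimLen l = (l.dropWhile PySem.Chars.isspace).length := by
  induction l with
  | nil => simp [pvTrimLen]
  | cons c t ih =>
    by_cases h : PySem.Chars.isspace c
    · simp [pvTrimLen, h, ih]
    · simp [pvTrimLen, h]

theorem pvTrimLen_le (cs : List Char) : pvTrimLen cs.reverse ≤ cs.length := by
  rw [pvTrimLen_eq]
  calc (cs.reverse.dropWhile PySem.Chars.isspace).length
      ≤ cs.reverse.length := List.length_dropWhile_le _ _
    _ = cs.length := List.length_reverse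

-- the prefix of length pvTrimLen cs.reverse IS Python's rstrip
theorem take_pvTrimLen (cs : List Char) :
    cs.take (pvTrimLen cs.reverse) = PySem.Chars.rstrip cs := by
  rw [pvTrimLen_eq]
  have hsuf : (cs.reverse.dropWhile PySem.Chars.isspace) <:+ cs.reverse :=
    List.dropWhile_suffix _
  have hpre : (cs.reverse.dropWhile PySem.Chars.isspace).reverse <+: cs := by
    have := List.reverse_prefix.mpr hsuf
    simpa using this
  have heq := List.prefix_iff_eq_take.mp hpre
  rw [PySem.Chars.rstrip]
  have hlen : ((cs.reverse.dropWhile PySem.Chars.isspace).reverse).length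
      = (cs.reverse.dropWhile PySem.Chars.isspace).length := List.length_reverse
  rw [← hlen]
  exact heq.symm

-- Chars.replace with a single-char pattern is a per-char map
theorem replace_single_go (a b : Char) (l : List Char) (fuel : Nat) (acc : List Char)
    (h : l.length ≤ fuel) :
    PySem.Chars.replace.go [a] [b] fuel l acc
      = acc.reverse ++ l.map (fun c => if c = a then b else c) := by
  induction l generalizing fuel acc with
  | nil => cases fuel <;> simp [PySem.Chars.replace.go]
  | cons c t ih =>
    cases fuel with
    | zero => simp at h
    | succ f =>
      by_cases hc : c = a
      · subst hc
        have : [c].isPrefixOf (c :: t) = true := by simp [List.isPrefixOf]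
        simp only [PySem.Chars.replace.go, this, if_pos]
        have hd : List.drop ([c] : List Char).length (c :: t) = t := by simp
        rw [hd, show ([b] : List Char).reverse ++ acc = b :: acc from by simp]
        rw [ih f (b :: acc) (by simp at h; omega)]
        simp
      · have : [a].isPrefixOf (c :: t) = false := by
          simp [List.isPrefixOf]
          exact fun e => absurd e.symm hc
        simp only [PySem.Chars.replace.go, this]
        rw [ih f (c :: acc) (by simp at h; omega)]
        simp [hc]

theorem replace_single (a b : Char) (l : List Char) :
    PySem.Chars.replace l [a] [b] = l.map (fun c => if c = a then b else c) := by
  rw [PySem.Chars.replace]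
  simp only [List.isEmpty_cons]
  exact replace_single_go a b l l.length [] (Nat.le_refl _)

-- Source B's fused per-char transform equals A's upper-then-tab-replace, per char
theorem pvCleanChar_eq (c : Char) :
    pvCleanChar c = (if PySem.Chars.upperChar c = '\t' then ' ' else PySem.Chars.upperChar c) := by
  by_cases ht : c = '\t'
  · subst ht; decide
  · by_cases hl : ('a' ≤ c && c ≤ 'z') = true
    · have h97 : 97 ≤ c.toNat := by
        simp at hl
        exact Nat.succ_le_of_lt hl.1
      have h122 : c.toNat ≤ 122 := by
        simp at hl
        exact hl.2
      have hne : Char.ofNat (c.toNat - 32) ≠ '\t' := by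
        have hv : (c.toNat - 32).isValidChar := Or.inl (by omega)
        intro h
        have h2 := congrArg Char.toNat h
        rw [Char.ofNat, dif_pos hv] at h2
        simp only [Char.ofNatAux, Char.toNat, UInt32.toNat] at h2 h97 h122
        have h9 : ('\t'.val.toBitVec).toNat = 9 := by decide
        rw [h9, BitVec.toNat_ofNatLT] at h2
        omega
      rw [pvCleanChar, if_neg (by simpa using ht), if_pos hl,
        PySem.Chars.upperChar, PySem.Chars.islower, if_pos hl, if_neg hne]
    · have hnl : PySem.Chars.islower c = false := by
        rw [PySem.Chars.islower]
        simpa using hl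
      rw [pvCleanChar, if_neg (by simpa using ht), if_neg hl,
        PySem.Chars.upperChar, hnl]
      simp [ht]

-- the comment test on the rstripped prefix, as Source B's index comparisons
theorem startswith_take (cs : List Char) (i : Nat) (hi : i ≤ cs.length) :
    PySem.Chars.startswith (cs.take i) ['-', '-']
      = (decide (2 ≤ i) && (cs[0]? == some '-') && (cs[1]? == some '-')) := by
  rw [PySem.Chars.startswith]
  match cs, i with
  | [], _ => simp at hi; subst hi; simp
  | c :: t, 0 => simp
  | [c], 1 => simp [List.isPrefixOf]
  | c :: d :: t, 1 => simp [List.isPrefixOf]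
  | c :: d :: t, (n + 2) =>
    simp [List.isPrefixOf, List.take_succ_cons, BEq.comm]

-- empty test
theorem take_eq_nil (cs : List Char) (i : Nat) (hi : i ≤ cs.length) :
    (cs.take i = []) ↔ i = 0 := by
  rw [List.take_eq_nil_iff]
  constructor
  · rintro (h | h)
    · exact h
    · subst h; simpa using hi
  · exact Or.inl

-- A's contribution per line
theorem cleanse_cons (h : String) (t : List String) :
    cleanse_ofm_lines (h :: t) =
      (if (PySem.Chars.startswith (PySem.Chars.rstrip h.toList) ['-', '-'] || (PySem.Str.rstrip h == ""))
       then ([] : List String)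
       else [PySem.Str.replace (PySem.Str.upper (PySem.Str.rstrip h)) "\t" " "]) ++ cleanse_ofm_lines t := by
  by_cases hc : PySem.Chars.startswith (PySem.Chars.rstrip h.toList) ['-', '-'] = true
  · simp [cleanse_ofm_lines, hc]
  · by_cases he : PySem.Str.rstrip h = ""
    · simp [cleanse_ofm_lines, hc, he]
    · simp [cleanse_ofm_lines, hc, he]

-- the two skip conditions agree (as Bools)
theorem cond_eq (h : String) :
    (pvTrimLen h.toList.reverse == 0
      || (decide (2 ≤ pvTrimLen h.toList.reverse) && (h.toList[0]? == some '-') && (h.toList[1]? == some '-')))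
    = (PySem.Chars.startswith (PySem.Chars.rstrip h.toList) ['-', '-'] || (PySem.Str.rstrip h == "")) := by
  have hle := pvTrimLen_le h.toList
  have htake := take_pvTrimLen h.toList
  apply Bool.coe_iff_coe.mp
  rw [← htake, startswith_take h.toList _ hle]
  have hempty : (PySem.Str.rstrip h == "") = true ↔ pvTrimLen h.toList.reverse = 0 := by
    rw [beq_iff_eq]
    rw [show PySem.Str.rstrip h = String.ofList (PySem.Chars.rstrip h.toList) from rfl]
    rw [← htake]
    simp [take_eq_nil h.toList _ hle]
  simp only [Bool.or_eq_true, hempty, beq_iff_eq]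
  tauto

-- the two per-line output strings agree
theorem out_eq (h : String) :
    String.ofList ((h.toList.take (pvTrimLen h.toList.reverse)).map pvCleanChar)
    = PySem.Str.replace (PySem.Str.upper (PySem.Str.rstrip h)) "\t" " " := by
  rw [show PySem.Str.replace (PySem.Str.upper (PySem.Str.rstrip h)) "\t" " "
      = String.ofList (PySem.Chars.replace (PySem.Chars.upper (PySem.Chars.rstrip h.toList)) ['\t'] [' ']) from by
    simp [PySem.Str.replace, PySem.Str.upper, PySem.Str.rstrip]]
  congr 1
  rw [take_pvTrimLen, PySem.Chars.upper, replace_single, List.map_map]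
  apply List.map_congr_left
  intro c _
  simp only [Function.comp]
  rw [pvCleanChar_eq]

-- the accumulator fold of B computes A
theorem alt_foldl_acc (acc : List String) (l : List String) :
    l.foldl (fun result line =>
      let cs := line.toList
      let i := pvTrimLen cs.reverse
      if i == 0 || (decide (2 ≤ i) && (cs[0]? == some '-') && (cs[1]? == some '-')) then result
      else result ++ [String.ofList ((cs.take i).map pvCleanChar)]) acc
    = acc ++ cleanse_ofm_lines l := by
  induction l generalizing acc with
  | nil => simp [cleanse_ofm_lines]
  | cons h t ih =>
    rw [List.foldl_cons, cleanse_cons]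
    cases hb : (pvTrimLen h.toList.reverse == 0
        || (decide (2 ≤ pvTrimLen h.toList.reverse) && (h.toList[0]? == some '-') && (h.toList[1]? == some '-'))) with
    | true =>
      have hb' := (cond_eq h) ▸ hb
      simp only [hb, if_pos]
      rw [ih, hb']
      simp
    | false =>
      have hb' := (cond_eq h) ▸ hb
      simp only [hb, Bool.false_eq_true, if_false, hb']
      rw [ih, out_eq h]
      simp

-- ===== VERDICT =====
theorem cleanse_ofm_lines_spec : Claim_equal_cleanse_ofm_lines := by
  intro filelines _
  unfold Spec_cleanse_ofm_lines cleanse_ofm_lines_alt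
  rw [alt_foldl_acc]
  simp
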